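-- pv_equiv track=rewrite | github.com/huizoo/algo | 프로그래머스/1/135808. 과일 장수/과일 장수.py | solution
-- ===== SOURCE A (Python) =====
-- def solution(k, m, score):
--     answer = 0
--     n = len(score)
--     score.sort(reverse=True)
--
--     for i in range(0, n-n%m, m):
--         Min = min(score[i:i+m])
--         answer += Min*m
--
--     return answer
-- ===== SOURCE B (Python) =====
-- def solution(k, m, score):
--     # Count each score once, then walk the distinct scores from high to low,
--     # counting how many m-group boundaries fall inside each value's run.
--     counts = {}
--     for v in score:
--         counts[v] = counts.get(v, 0) + 1
--     answer = 0
--     t = 0  # fruits already taken (all with a higher score)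
--     for v in sorted(counts, reverse=True):
--         c = counts[v]
--         # number of complete-group end positions among positions t+1 .. t+c
--         hit = max(0, (t + c) // m - t // m)
--         answer += v * m * hit
--         t += c
--     return answer
-- ===== Notes on version B (the rewrite author's own statement) =====
-- stated objective: alternative
-- what changed: B replaces A's sort-then-scan-every-group approach by a counting one: it tallies each score in a dict in one pass, walks only the distinct scores from high to low, and computes arithmetically ((t+c)//m - t//m) how many m-group boundaries fall inside each value's run, so no per-element group scan and no full sort of the list happens.
import Mathlib
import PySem

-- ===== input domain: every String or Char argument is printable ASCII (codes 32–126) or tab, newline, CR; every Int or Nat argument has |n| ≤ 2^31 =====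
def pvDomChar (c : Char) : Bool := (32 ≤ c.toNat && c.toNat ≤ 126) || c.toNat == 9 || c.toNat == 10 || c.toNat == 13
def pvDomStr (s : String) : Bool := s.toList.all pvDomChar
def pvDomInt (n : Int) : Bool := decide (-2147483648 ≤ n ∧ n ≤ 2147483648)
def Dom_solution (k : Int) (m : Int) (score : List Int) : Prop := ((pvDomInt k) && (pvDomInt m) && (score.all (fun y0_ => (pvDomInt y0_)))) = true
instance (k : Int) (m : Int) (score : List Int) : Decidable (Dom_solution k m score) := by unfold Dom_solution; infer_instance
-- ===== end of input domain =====

-- B drops A's full sort: it counts each score in a dict, walks the distinct scores from high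
-- to low and counts the m-group boundaries inside each value's run arithmetically (objective:
-- alternative). A sorts `score` in place, B does not mutate it; the theorems are about the
-- return value only.

-- ===== PORT A =====
def solution (k : Int) (m : Int) (score : List Int) : Int :=
  let n : Int := PySem.List.len score
  let s := PySem.List.sorted score (fun x => x) true
  -- min(score[i:i+m]): the slice is never empty on Pre_ (m ≥ 1 forces i+m ≤ n inside the range),
  -- so the `.getD 0` default is never used there
  (PySem.List.pyRange 0 (n - PySem.Int.mod n m) m).foldl
    (fun answer i =>
      answer + ((PySem.List.min? (PySem.List.slice s (some i) (some (i + m))) (fun x => x)).getD 0) * m) 0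

-- ===== PORT B =====
def solution_alt (k : Int) (m : Int) (score : List Int) : Int :=
  let counts := score.foldl (fun d v => d.insert v (d.getD v 0 + 1)) PySem.Dict.empty
  ((PySem.List.sorted counts.keys (fun x => x) true).foldl
    (fun (st : Int × Int) v =>
      let c := counts.getD v 0
      (st.1 + v * m * max 0 (PySem.Int.floordiv (st.2 + c) m - PySem.Int.floordiv st.2 m),
       st.2 + c)) ((0 : Int), (0 : Int))).1

-- ===== PRECONDITION & SPEC =====
-- Pre_ excludes only m = 0, where A raises ZeroDivisionError (n % m); B raises there too unless score is empty.
def Pre_solution (k : Int) (m : Int) (score : List Int) : Prop := m ≠ 0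
instance (k : Int) (m : Int) (score : List Int) : Decidable (Pre_solution k m score) := by unfold Pre_solution; infer_instance
def pvWitness_solution : Int × Int × List Int := (3, 2, [1, 2, 3, 1, 2, 3, 1])

def Spec_solution (k : Int) (m : Int) (score : List Int) (out : Int) : Prop := out = solution_alt k m score
instance (k : Int) (m : Int) (score : List Int) (out : Int) : Decidable (Spec_solution k m score out) := by unfold Spec_solution; infer_instance

-- ===== CLAIM (what is proved, stated in full; the proofs are below) =====
def Claim_equal_solution : Prop := ∀ (k : Int) (m : Int) (score : List Int), Dom_solution k m score → Pre_solution k m score → Spec_solution k m score (solution k m score)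

-- ===== LEMMAS AND PROOFS =====

-- a pyRange with negative step starting at or below its stop is empty
lemma pyRange_empty_of_neg_step (a b s : Int) (hs : s < 0) (hab : a ≤ b) :
    PySem.List.pyRange a b s = [] := by
  simp only [PySem.List.pyRange]
  rw [if_neg (by omega)]
  rw [if_neg (by omega), if_neg (by omega)]
  simp

-- minimum of a nonempty window of a descending (Pairwise ≥) list is its last element
lemma min_window_desc (s : List Int) (hp : s.Pairwise (fun a b => b ≤ a))
    (j M : Nat) (hM : 0 < M) (h : j + M ≤ s.length) :
    PySem.List.min? ((s.drop j).take M) (fun x => x) = some (s[j + M - 1]'(by omega)) := by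
  have hlen : ((s.drop j).take M).length = M := by
    simp [List.length_take, List.length_drop]; omega
  have hget : ∀ (i : Nat) (hi : i < M),
      ((s.drop j).take M)[i]'(by omega) = s[j + i]'(by omega) := by
    intro i hi
    simp [List.getElem_take, List.getElem_drop, Nat.add_comm j i]
  obtain ⟨v, hv⟩ : ∃ v, PySem.List.min? ((s.drop j).take M) (fun x => x) = some v := by
    cases h' : PySem.List.min? ((s.drop j).take M) (fun x => x) with
    | none =>
        have := (PySem.List.min?_eq_none_iff _ _).1 h'
        rw [this] at hlen; simp at hlen; omega
    | some v => exact ⟨v, rfl⟩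
  have hmem := PySem.List.min?_mem hv
  have hmin := PySem.List.min?_isMin hv
  obtain ⟨i, hi, hvi⟩ := List.getElem_of_mem hmem
  have hi' : i < M := by omega
  have hvi' : v = s[j + i]'(by omega) := by rw [← hvi, hget i hi']
  have hlast_mem : (s[j + M - 1]'(by omega)) ∈ (s.drop j).take M := by
    have := hget (M - 1) (by omega)
    have hmem' : ((s.drop j).take M)[M-1]'(by omega) ∈ (s.drop j).take M := List.getElem_mem _
    rw [this] at hmem'
    simpa [Nat.add_sub_assoc (by omega : 1 ≤ M) j] using hmem'
  have h1 : v ≤ s[j + M - 1]'(by omega) := hmin _ hlast_mem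
  have h2 : (s[j + M - 1]'(by omega)) ≤ v := by
    rcases Nat.lt_or_ge (j + i) (j + M - 1) with hlt | hge
    · have := (List.pairwise_iff_getElem.mp hp) (j + i) (j + M - 1) (by omega) (by omega) hlt
      omega
    · have : j + i = j + M - 1 := by omega
      simp [hvi', this]
  rw [hv, le_antisymm h1 h2]

-- A's value for m > 0: m times the sum of the descending-sorted list at indices j*M + M - 1
lemma A_char (k m : Int) (score : List Int) (hm : 0 < m) :
    solution k m score =
      m * ((List.range (score.length / m.toNat)).map
        (fun j => (PySem.List.sorted score (fun x => x) true).getD (j * m.toNat + m.toNat - 1) 0)).sum := by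
  simp only [solution]
  set s := PySem.List.sorted score (fun x : Int => x) true with hs
  set N := score.length with hN
  have hslen : s.length = N := by rw [hs, hN]; exact PySem.List.length_sorted _ _ _
  set M := m.toNat with hM
  have hMpos : 0 < M := by omega
  have hmM : m = (M : Int) := by omega
  set q := N / M with hq
  have hqle : M * q ≤ N := by rw [hq, Nat.mul_comm]; exact Nat.div_mul_le_self N M
  have hp : s.Pairwise (fun a b => b ≤ a) := by
    simpa using PySem.List.sorted_pairwise_rev score (fun x : Int => x)
  have hlenScore : PySem.List.len score = (N : Int) := by simp [PySem.List.len, hN]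
  have hmodA : PySem.Int.mod (N : Int) m = ((N % M : Nat) : Int) := by
    rw [hmM]; exact PySem.Int.mod_natCast N M
  have hsub : (N : Int) - ((N % M : Nat) : Int) = ((M * q : Nat) : Int) := by
    have hdm : M * q + N % M = N := by rw [hq]; exact Nat.div_add_mod N M
    push_cast
    omega
  have hrangeA : PySem.List.pyRange 0 ((N : Int) - PySem.Int.mod (N : Int) m) m
      = (List.range q).map (fun j : Nat => m * (j : Int)) := by
    rw [hmodA, hsub, PySem.List.pyRange_of_pos _ _ hm]
    have hcnt : (if (0:Int) < ((M * q : Nat) : Int)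
        then ((((M * q : Nat) : Int) - 0 + m - 1) / m).toNat else 0) = q := by
      by_cases h0 : (0:Int) < ((M * q : Nat) : Int)
      · rw [if_pos h0]
        have : (((M * q : Nat) : Int) - 0 + m - 1) = (((M * q + (M - 1) : Nat)) : Int) := by
          push_cast; omega
        rw [this, hmM, ← Int.natCast_div, Int.toNat_natCast]
        rw [Nat.mul_add_div hMpos, Nat.div_eq_of_lt (by omega)]
        omega
      · rw [if_neg h0]
        have : M * q = 0 := by omega
        have : q = 0 := by
          rcases Nat.mul_eq_zero.mp this with h | h
          · omega
          · exact h
        omega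
    have hfun : (fun k : Nat => (0 : Int) + m * (k : Int)) = (fun j : Nat => m * (j : Int)) := by
      funext j; ring
    rw [hcnt, hfun]
  rw [hlenScore, hrangeA, List.foldl_map, PySem.List.foldl_add, zero_add]
  have hmaps : (List.range q).map
        (fun j : Nat => (PySem.List.min? (PySem.List.slice s (some (m * (j : Int))) (some (m * (j : Int) + m))) (fun x => x)).getD 0 * m)
      = (List.range q).map (fun j : Nat => s.getD (j * M + M - 1) 0 * m) := by
    apply List.map_congr_left
    intro j hj
    have hjq : j < q := List.mem_range.mp hj
    have hbound : M * j + M ≤ N := by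
      have h1 : M * j + M = M * (j + 1) := by ring
      rw [h1]
      exact le_trans (Nat.mul_le_mul_left M (by omega)) hqle
    congr 1
    have hAslice : PySem.List.slice s (some (m * j)) (some (m * j + m))
        = (s.drop (M * j)).take M := by
      rw [PySem.List.slice_toNat s (by positivity) (by positivity)]
      have h1 : ((m * j : Int)).toNat = M * j := by rw [hmM]; push_cast; omega
      have h2 : ((m * j + m : Int)).toNat = M * j + M := by rw [hmM]; push_cast; omega
      rw [h1, h2, Nat.add_sub_cancel_left]
    have hcomm : M * j = j * M := Nat.mul_comm M j
    rw [hAslice, min_window_desc s hp (M * j) M hMpos (by omega)]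
    rw [List.getD_eq_getElem s 0 (by rw [hslen]; omega)]
    simp only [Option.getD_some]
    congr 1
    omega
  rw [hmaps, List.sum_map_mul_right]
  ring

-- positions p with (r+p+1) % M = 0, summed left to right
def Tsum (M : Nat) : Nat → List Int → Int
  | _, [] => 0
  | r, x :: xs => (if (r + 1) % M = 0 then x else 0) + Tsum M (r + 1) xs

lemma Tsum_append (M r : Nat) (xs ys : List Int) :
    Tsum M r (xs ++ ys) = Tsum M r xs + Tsum M (r + xs.length) ys := by
  induction xs generalizing r with
  | nil => simp [Tsum]
  | cons x xs ih =>
      simp only [List.cons_append, Tsum, ih (r + 1), List.length_cons]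
      ring_nf

lemma Tsum_replicate (M : Nat) (hM : 0 < M) (t c : Nat) (v : Int) :
    Tsum M t (List.replicate c v) = v * ((((t + c) / M : Nat) : Int) - (((t / M : Nat)) : Int)) := by
  induction c generalizing t with
  | zero => simp [Tsum]
  | succ c ih =>
      rw [List.replicate_succ]
      simp only [Tsum, ih (t + 1)]
      have hsucc : (t + 1) / M = t / M + if M ∣ t + 1 then 1 else 0 := Nat.succ_div
      have hdvd : ((t + 1) % M = 0) ↔ M ∣ t + 1 := Nat.dvd_iff_mod_eq_zero.symm
      have hle : t / M ≤ (t + 1) / M := Nat.div_le_div_right (by omega)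
      have harr : t + 1 + c = t + (c + 1) := by omega
      rw [harr] at *
      by_cases h : M ∣ t + 1
      · rw [if_pos (hdvd.mpr h)]
        rw [hsucc, if_pos h] at *
        push_cast
        ring
      · rw [if_neg (fun hh => h (hdvd.mp hh))]
        rw [hsucc, if_neg h] at *
        push_cast
        ring

lemma Tsum_eq_filter_sum (M : Nat) (r : Nat) (s : List Int) :
    Tsum M r s = ∑ p ∈ Finset.range s.length, (if (r + p + 1) % M = 0 then s.getD p 0 else 0) := by
  induction s generalizing r with
  | nil => simp [Tsum]
  | cons x xs ih =>
      rw [List.length_cons, Finset.sum_range_succ']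
      simp only [Tsum, ih (r + 1), List.getD_cons_succ, List.getD_cons_zero]
      have : ∀ p, r + 1 + p + 1 = r + (p + 1) + 1 := by omega
      simp only [this]
      have : r + 0 + 1 = r + 1 := by omega
      rw [this, add_comm]

lemma filter_sum_eq_strided (M n : Nat) (hM : 0 < M) (f : Nat → Int) :
    (∑ p ∈ Finset.range n, (if (p + 1) % M = 0 then f p else 0))
      = ∑ j ∈ Finset.range (n / M), f (j * M + M - 1) := by
  rw [← Finset.sum_filter]
  refine Finset.sum_nbij' (i := fun p => (p + 1) / M - 1) (j := fun j => j * M + M - 1)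
    ?_ ?_ ?_ ?_ ?_ <;> intro a ha
  · simp only [Finset.mem_filter, Finset.mem_range] at ha ⊢
    obtain ⟨han, hdvd⟩ := ha
    obtain ⟨q, hq⟩ := Nat.dvd_of_mod_eq_zero hdvd
    have hq1 : 1 ≤ q := by nlinarith [Nat.pos_of_ne_zero (show q ≠ 0 by rintro rfl; omega)]
    have h1 : (a + 1) / M = q := by rw [hq, Nat.mul_div_cancel_left _ hM]
    have h2 : q * M ≤ n := by nlinarith
    have h3 : q ≤ n / M := (Nat.le_div_iff_mul_le hM).mpr h2
    omega
  · simp only [Finset.mem_range] at ha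
    simp only [Finset.mem_filter, Finset.mem_range]
    have hmul : (a + 1) * M = a * M + M := by ring
    refine ⟨?_, ?_⟩
    · have : (a + 1) * M ≤ n := (Nat.le_div_iff_mul_le hM).mp (by omega)
      omega
    · have h1 : a * M + M - 1 + 1 = (a + 1) * M := by omega
      rw [h1, Nat.mul_mod_left]
  · simp only [Finset.mem_filter, Finset.mem_range] at ha
    obtain ⟨han, hdvd⟩ := ha
    obtain ⟨q, hq⟩ := Nat.dvd_of_mod_eq_zero hdvd
    have hq1 : 1 ≤ q := by nlinarith [Nat.pos_of_ne_zero (show q ≠ 0 by rintro rfl; omega)]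
    have h1 : (a + 1) / M = q := by rw [hq, Nat.mul_div_cancel_left _ hM]
    simp only [h1]
    have h2 : (q - 1) * M = q * M - M := by cases q with | zero => omega | succ q' => simp [Nat.succ_mul]
    have hc : M * q = q * M := Nat.mul_comm M q
    have hle : M ≤ q * M := Nat.le_mul_of_pos_left M hq1
    omega
  · simp only [Finset.mem_range] at ha
    have hmul : (a + 1) * M = a * M + M := by ring
    have h1 : a * M + M - 1 + 1 = (a + 1) * M := by omega
    simp only [h1, Nat.mul_div_cancel _ hM]
    omega
  · simp only [Finset.mem_filter, Finset.mem_range] at ha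
    obtain ⟨han, hdvd⟩ := ha
    obtain ⟨q, hq⟩ := Nat.dvd_of_mod_eq_zero hdvd
    have hq1 : 1 ≤ q := by nlinarith [Nat.pos_of_ne_zero (show q ≠ 0 by rintro rfl; omega)]
    have h1 : (a + 1) / M = q := by rw [hq, Nat.mul_div_cancel_left _ hM]
    have h2 : (q - 1) * M = q * M - M := by cases q with | zero => omega | succ q' => simp [Nat.succ_mul]
    have hc : M * q = q * M := Nat.mul_comm M q
    have hle : M ≤ q * M := Nat.le_mul_of_pos_left M hq1
    have h3 : ((a + 1) / M - 1) * M + M - 1 = a := by rw [h1]; omega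
    rw [h3]


-- descending sorted list as concatenated runs of its distinct values

lemma count_flatMap_replicate (cnt : Int → Nat) (vals : List Int) (hnd : vals.Nodup) (x : Int) :
    (vals.flatMap (fun v => List.replicate (cnt v) v)).count x
      = if x ∈ vals then cnt x else 0 := by
  induction vals with
  | nil => simp
  | cons v vs ih =>
      rw [List.flatMap_cons, List.count_append, List.count_replicate,
          ih (List.nodup_cons.mp hnd).2]
      rcases List.nodup_cons.mp hnd with ⟨hv, _⟩
      by_cases hxv : x = v
      · subst hxv
        simp [hv]
      · simp [hxv, Ne.symm hxv]

lemma flatMap_replicate_pairwise (cnt : Int → Nat) :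
    ∀ vals : List Int, vals.Pairwise (fun a b => b < a) →
      (vals.flatMap (fun v => List.replicate (cnt v) v)).Pairwise (fun a b : Int => b ≤ a) := by
  intro vals
  induction vals with
  | nil => intro _; simp
  | cons v vs ih =>
      intro hgt
      rw [List.flatMap_cons, List.pairwise_append]
      obtain ⟨hhead, htail⟩ := List.pairwise_cons.mp hgt
      refine ⟨List.pairwise_replicate.mpr (by simp), ih htail, ?_⟩
      intro x hx y hy
      obtain ⟨w, hw, hyw⟩ := List.mem_flatMap.mp hy
      have hxv : x = v := List.eq_of_mem_replicate hx
      have hyw' : y = w := List.eq_of_mem_replicate hyw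
      subst hxv; subst hyw'
      exact le_of_lt (hhead y hw)

lemma sorted_eq_flatMap_runs (score : List Int) :
    PySem.List.sorted score (fun x => x) true
      = (PySem.List.sorted (PySem.Set.ofList score) (fun x => x) true).flatMap
          (fun v => List.replicate (score.count v) v) := by
  set vals := PySem.List.sorted (PySem.Set.ofList score) (fun x => x) true with hvals
  have hnd : vals.Nodup := (PySem.List.sorted_perm _ _ _).symm.nodup (PySem.Set.nodup_ofList score)
  have hge : vals.Pairwise (fun a b => b ≤ a) := PySem.List.sorted_pairwise_rev _ _
  have hgt : vals.Pairwise (fun a b => b < a) :=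
    (hge.and hnd).imp (fun h => lt_of_le_of_ne h.1 (Ne.symm h.2))
  have hmemv : ∀ x, x ∈ vals ↔ x ∈ score := by
    intro x
    rw [hvals, PySem.List.mem_sorted, PySem.Set.mem_ofList]
  have hperm : (vals.flatMap (fun v => List.replicate (score.count v) v)).Perm score := by
    rw [List.perm_iff_count]
    intro x
    rw [count_flatMap_replicate _ _ hnd x]
    by_cases hx : x ∈ vals
    · simp [hx]
    · simp [hx, List.count_eq_zero.mpr (fun hmem => hx ((hmemv x).mpr hmem))]
  have hsorted2 : (vals.flatMap (fun v => List.replicate (score.count v) v)).Pairwise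
      (fun a b : Int => b ≤ a) := flatMap_replicate_pairwise _ vals hgt
  have hsorted1 : (PySem.List.sorted score (fun x => x) true).Pairwise (fun a b : Int => b ≤ a) :=
    PySem.List.sorted_pairwise_rev _ _
  have hp : (PySem.List.sorted score (fun x => x) true).Perm
      (vals.flatMap (fun v => List.replicate (score.count v) v)) :=
    (PySem.List.sorted_perm _ _ _).trans hperm.symm
  exact hp.eq_of_pairwise (fun a b _ _ h1 h2 => le_antisymm h2 h1) hsorted1 hsorted2

-- floordiv by a negative divisor is antitone
lemma floordiv_antitone_neg (m a b : Int) (hm : m < 0) (hab : a ≤ b) :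
    PySem.Int.floordiv b m ≤ PySem.Int.floordiv a m := by
  by_contra h
  have h1 := PySem.Int.floordiv_mul_add_mod a m
  have h2 := PySem.Int.floordiv_mul_add_mod b m
  have h3 := PySem.Int.mod_neg_bounds a hm
  have h4 := PySem.Int.mod_neg_bounds b hm
  have h5 : PySem.Int.floordiv b m * m ≤ (PySem.Int.floordiv a m + 1) * m :=
    mul_le_mul_of_nonpos_right (by omega) (le_of_lt hm)
  have h6 : (PySem.Int.floordiv a m + 1) * m = PySem.Int.floordiv a m * m + m := by ring
  linarith

-- B's fold for m > 0 accumulates m * Tsum of the runs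
lemma B_fold_pos (m : Int) (hm : 0 < m) (cnt : Int → Nat) :
    ∀ (vals : List Int) (t : Nat) (ans : Int),
      (vals.foldl (fun (st : Int × Int) v =>
          (st.1 + v * m * max 0 (PySem.Int.floordiv (st.2 + ((cnt v : Nat) : Int)) m - PySem.Int.floordiv st.2 m),
           st.2 + ((cnt v : Nat) : Int))) (ans, (t : Int))).1
        = ans + m * Tsum m.toNat t (vals.flatMap (fun v => List.replicate (cnt v) v)) := by
  intro vals
  induction vals with
  | nil => intro t ans; simp [Tsum]
  | cons v vs ih =>
      intro t ans
      have hMpos : 0 < m.toNat := by omega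
      have hmM : m = ((m.toNat : Nat) : Int) := by omega
      have hcast : (t : Int) + ((cnt v : Nat) : Int) = ((t + cnt v : Nat) : Int) := by push_cast; ring
      have hfd1 : PySem.Int.floordiv ((t : Int) + ((cnt v : Nat) : Int)) m
          = (((t + cnt v) / m.toNat : Nat) : Int) := by
        rw [hcast, hmM, PySem.Int.floordiv_natCast]; simp
      have hfd2 : PySem.Int.floordiv (t : Int) m = ((t / m.toNat : Nat) : Int) := by
        rw [hmM, PySem.Int.floordiv_natCast]; simp
      have hmono : t / m.toNat ≤ (t + cnt v) / m.toNat := Nat.div_le_div_right (by omega)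
      have hmax : max 0 (PySem.Int.floordiv ((t : Int) + ((cnt v : Nat) : Int)) m - PySem.Int.floordiv (t : Int) m)
          = (((t + cnt v) / m.toNat : Nat) : Int) - ((t / m.toNat : Nat) : Int) := by
        rw [hfd1, hfd2]
        have : ((t / m.toNat : Nat) : Int) ≤ (((t + cnt v) / m.toNat : Nat) : Int) := by exact_mod_cast hmono
        omega
      rw [hcast] at hmax
      simp only [List.foldl_cons, hcast, hmax, List.flatMap_cons]
      rw [ih (t + cnt v)]
      rw [Tsum_append, Tsum_replicate m.toNat hMpos t (cnt v) v, List.length_replicate]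
      ring

-- B's fold for m < 0 never adds anything
lemma B_fold_neg (m : Int) (hm : m < 0) (cnt : Int → Nat) :
    ∀ (vals : List Int) (t ans : Int),
      (vals.foldl (fun (st : Int × Int) v =>
          (st.1 + v * m * max 0 (PySem.Int.floordiv (st.2 + ((cnt v : Nat) : Int)) m - PySem.Int.floordiv st.2 m),
           st.2 + ((cnt v : Nat) : Int))) (ans, t)).1 = ans := by
  intro vals
  induction vals with
  | nil => intro t ans; rfl
  | cons v vs ih =>
      intro t ans
      have hd : PySem.Int.floordiv (t + ((cnt v : Nat) : Int)) m ≤ PySem.Int.floordiv t m :=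
        floordiv_antitone_neg m t _ hm (by omega)
      have hmax : max 0 (PySem.Int.floordiv (t + ((cnt v : Nat) : Int)) m - PySem.Int.floordiv t m) = 0 := by
        omega
      simp only [List.foldl_cons, hmax, mul_zero, add_zero]
      exact ih _ _

lemma list_sum_range_eq_finset (f : Nat → Int) (n : Nat) :
    ((List.range n).map f).sum = ∑ j ∈ Finset.range n, f j := by
  induction n with
  | zero => simp
  | succ n ih =>
      rw [Finset.sum_range_succ, List.range_succ, List.map_append, List.sum_append, ih]
      simp

-- solution_alt with the counter dict replaced by List.count
lemma alt_unfold (k m : Int) (score : List Int) :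
    solution_alt k m score
      = ((PySem.List.sorted (PySem.Set.ofList score) (fun x => x) true).foldl
          (fun (st : Int × Int) v =>
            (st.1 + v * m * max 0 (PySem.Int.floordiv (st.2 + ((score.count v : Nat) : Int)) m - PySem.Int.floordiv st.2 m),
             st.2 + ((score.count v : Nat) : Int))) ((0 : Int), (0 : Int))).1 := by
  simp only [solution_alt, PySem.Dict.foldl_insert_getD_add_one_eq_counter,
    PySem.Dict.keys_counter, PySem.Dict.getD_counter]

-- ===== VERDICT (by name: the statement is the Claim_ definition above) =====
theorem solution_spec : Claim_equal_solution := by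
  intro k m score _hdom hpre
  unfold Spec_solution
  rw [alt_unfold]
  rcases lt_trichotomy m 0 with hneg | hzero | hpos
  · -- m < 0: A's range is empty, B's fold never adds
    have hB := B_fold_neg m hneg (fun v => score.count v)
      (PySem.List.sorted (PySem.Set.ofList score) (fun x => x) true) 0 0
    simp only [] at hB
    rw [hB]
    simp only [solution]
    have hn : (0:Int) ≤ PySem.List.len score := by simp [PySem.List.len]
    have hmod := PySem.Int.mod_neg_bounds (PySem.List.len score) hneg
    rw [pyRange_empty_of_neg_step _ _ _ hneg (by omega)]
    simp
  · exact absurd hzero hpre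
  · -- m > 0
    rw [A_char k m score hpos]
    have hB := B_fold_pos m hpos (fun v => score.count v)
      (PySem.List.sorted (PySem.Set.ofList score) (fun x => x) true) 0 0
    simp only [Nat.cast_zero] at hB
    rw [hB, zero_add, ← sorted_eq_flatMap_runs score]
    congr 1
    have hslen : (PySem.List.sorted score (fun x => x) true).length = score.length :=
      PySem.List.length_sorted _ _ _
    rw [list_sum_range_eq_finset, Tsum_eq_filter_sum]
    simp only [Nat.zero_add]
    rw [filter_sum_eq_strided m.toNat _ (by omega) (fun p => (PySem.List.sorted score (fun x => x) true).getD p 0)]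
    rw [hslen]
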